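-- pv_equiv track=rewrite | github.com/yogan/advent-of-code | 2024/day-14-python/aoc.py | has_long_horizontal_line
-- ===== SOURCE A (Python) =====
-- def has_long_horizontal_line(positions, max_x, max_y):
--     for y in range(max_y):
--         longest = 0
--         count = 0
--         for x in range(1, max_x):
--             if (x, y) in positions:
--                 count += 1
--             else:
--                 if count > longest:
--                     longest = count
--                 count = 0
--         if count > longest:
--             longest = count
--         if longest >= 10:
--             return True
--     return False
-- ===== SOURCE B (Python) =====
-- def has_long_horizontal_line(positions, max_x, max_y):
--     occ = {(x, y) for (x, y) in positions
--            if 1 <= x < max_x and 0 <= y < max_y}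
--     return any(all((x + k, y) in occ for k in range(10))
--                for (x, y) in occ)
-- ===== Notes on version B (the rewrite author's own statement) =====
-- stated objective: faster
-- what changed: Instead of scanning every grid cell of every row with an O(n) list-membership test per cell, B builds a hash set of the in-bounds occupied cells once and checks, for each occupied cell, the fixed 10-cell window starting there.
import Mathlib
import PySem

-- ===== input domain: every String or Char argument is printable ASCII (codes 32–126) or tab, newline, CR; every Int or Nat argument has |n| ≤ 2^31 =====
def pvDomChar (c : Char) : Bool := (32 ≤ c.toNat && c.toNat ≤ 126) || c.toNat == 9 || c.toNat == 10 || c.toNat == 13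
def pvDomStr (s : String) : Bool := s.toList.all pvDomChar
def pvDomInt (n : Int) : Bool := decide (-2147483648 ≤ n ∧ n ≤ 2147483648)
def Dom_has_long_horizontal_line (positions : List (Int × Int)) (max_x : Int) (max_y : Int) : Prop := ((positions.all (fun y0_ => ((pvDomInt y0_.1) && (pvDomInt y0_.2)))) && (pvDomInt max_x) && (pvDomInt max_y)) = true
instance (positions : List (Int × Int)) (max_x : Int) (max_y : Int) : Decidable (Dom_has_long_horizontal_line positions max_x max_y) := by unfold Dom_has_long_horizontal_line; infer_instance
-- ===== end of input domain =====

-- B replaces A's cell-by-cell scan of the whole grid (list membership per cell) by one pass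
-- building a set of in-bounds occupied cells and a fixed 10-cell window check per occupied cell (faster).


-- ===== PORT A =====
-- inner 'for x in range(1, max_x)' loop with state (longest, count), then the two trailing ifs
def pvRowA (positions : List (Int × Int)) (max_x : Int) (y : Int) : Int :=
  let lc := (PySem.List.pyRange 1 max_x 1).foldl
      (fun (lc : Int × Int) x =>
        if positions.contains (x, y) then (lc.1, lc.2 + 1)
        else (if lc.2 > lc.1 then lc.2 else lc.1, 0)) (0, 0)
  if lc.2 > lc.1 then lc.2 else lc.1

-- outer 'for y in range(max_y)' loop with its early return True
def pvLoopA (positions : List (Int × Int)) (max_x : Int) : List Int → Bool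
  | [] => false
  | y :: ys => if 10 ≤ pvRowA positions max_x y then true else pvLoopA positions max_x ys

def has_long_horizontal_line (positions : List (Int × Int)) (max_x : Int) (max_y : Int) : Bool :=
  pvLoopA positions max_x (PySem.List.pyRange 0 max_y 1)

-- ===== PORT B =====
def has_long_horizontal_line_alt (positions : List (Int × Int)) (max_x : Int) (max_y : Int) : Bool :=
  let occ : PySem.Set (Int × Int) :=
    PySem.Set.ofList (positions.filter
      (fun p => 1 ≤ p.1 && p.1 < max_x && 0 ≤ p.2 && p.2 < max_y))
  occ.any (fun p => (PySem.List.pyRange 0 10 1).all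
    (fun k => PySem.Set.contains occ (p.1 + k, p.2)))

-- ===== PRECONDITION & SPEC =====
def Spec_has_long_horizontal_line (positions : List (Int × Int)) (max_x : Int) (max_y : Int) (out : Bool) : Prop := out = has_long_horizontal_line_alt positions max_x max_y
instance (positions : List (Int × Int)) (max_x : Int) (max_y : Int) (out : Bool) : Decidable (Spec_has_long_horizontal_line positions max_x max_y out) := by unfold Spec_has_long_horizontal_line; infer_instance

-- ===== CLAIM (what is proved, stated in full; the proofs are below) =====
def Claim_equal_has_long_horizontal_line : Prop := ∀ (positions : List (Int × Int)) (max_x : Int) (max_y : Int), Dom_has_long_horizontal_line positions max_x max_y → Spec_has_long_horizontal_line positions max_x max_y (has_long_horizontal_line positions max_x max_y)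

-- ===== LEMMAS AND PROOFS =====

-- the common characterisation: a horizontal run of 10 occupied cells inside the scanned window
def pvGood (positions : List (Int × Int)) (max_x : Int) (max_y : Int) : Prop :=
  ∃ x y : Int, 0 ≤ y ∧ y < max_y ∧ 1 ≤ x ∧ x + 10 ≤ max_x ∧
    ∀ k : Int, 0 ≤ k → k < 10 → (x + k, y) ∈ positions

-- invariant of A's inner fold, by induction on the remaining range [a, max_x)
theorem pvRow_inv (positions : List (Int × Int)) (max_x y : Int) :
    ∀ n : ℕ, ∀ a l c : Int, a ≤ max_x → (max_x - a).toNat ≤ n → 0 ≤ l → 0 ≤ c →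
    ((10 ≤ (fun lc : Int × Int => if lc.2 > lc.1 then lc.2 else lc.1)
        ((PySem.List.pyRange a max_x 1).foldl
        (fun (lc : Int × Int) x =>
          if positions.contains (x, y) then (lc.1, lc.2 + 1)
          else (if lc.2 > lc.1 then lc.2 else lc.1, 0)) (l, c))) ↔
      (10 ≤ l ∨ ∃ x0 : Int, a - c ≤ x0 ∧ x0 + 10 ≤ max_x ∧
        ∀ k : Int, 0 ≤ k → k < 10 → (x0 + k < a ∨ (x0 + k, y) ∈ positions))) := by
  intro n
  induction n with
  | zero =>
      intro a l c ha hn hl hc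
      have hax : a = max_x := by omega
      subst hax
      rw [PySem.List.pyRange_one_eq_nil le_rfl]
      simp only [List.foldl_nil]
      constructor
      · intro h
        by_cases h10 : 10 ≤ l
        · exact Or.inl h10
        · refine Or.inr ⟨a - c, le_rfl, by split_ifs at h <;> omega, fun k hk0 hk10 => ?_⟩
          left; split_ifs at h <;> omega
      · rintro (h10 | ⟨x0, hx0, hx10, _⟩) <;> split_ifs <;> omega
  | succ n ih =>
      intro a l c ha hn hl hc
      rcases eq_or_lt_of_le ha with hax | hax
      · subst hax
        rw [PySem.List.pyRange_one_eq_nil le_rfl]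
        simp only [List.foldl_nil]
        constructor
        · intro h
          by_cases h10 : 10 ≤ l
          · exact Or.inl h10
          · refine Or.inr ⟨a - c, le_rfl, by split_ifs at h <;> omega, fun k hk0 hk10 => ?_⟩
            left; split_ifs at h <;> omega
        · rintro (h10 | ⟨x0, hx0, hx10, _⟩) <;> split_ifs <;> omega
      · rw [PySem.List.pyRange_one_cons hax]
        simp only [List.foldl_cons]
        by_cases hq : positions.contains (a, y)
        · rw [if_pos hq]
          rw [ih (a + 1) l (c + 1) (by omega) (by omega) hl (by omega)]
          have hmem : (a, y) ∈ positions := by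
            simpa using hq
          constructor
          · rintro (h10 | ⟨x0, hx0, hx10, hall⟩)
            · exact Or.inl h10
            · refine Or.inr ⟨x0, by omega, hx10, fun k hk0 hk10 => ?_⟩
              rcases hall k hk0 hk10 with hlt | hin
              · by_cases hka : x0 + k = a
                · exact Or.inr (hka ▸ hmem)
                · exact Or.inl (by omega)
              · exact Or.inr hin
          · rintro (h10 | ⟨x0, hx0, hx10, hall⟩)
            · exact Or.inl h10
            · refine Or.inr ⟨x0, by omega, hx10, fun k hk0 hk10 => ?_⟩
              rcases hall k hk0 hk10 with hlt | hin
              · exact Or.inl (by omega)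
              · exact Or.inr hin
        · rw [if_neg hq]
          have hnmem : (a, y) ∉ positions := by
            simpa using hq
          rw [ih (a + 1) (if c > l then c else l) 0 (by omega) (by omega) (by split_ifs <;> omega) le_rfl]
          constructor
          · rintro (h10 | ⟨x0, hx0, hx10, hall⟩)
            · split_ifs at h10 with hcl
              · -- 10 ≤ c : the run just finished, it is [a - c, a)
                refine Or.inr ⟨a - c, le_rfl, by omega, fun k hk0 hk10 => Or.inl (by omega)⟩
              · exact Or.inl h10
            · refine Or.inr ⟨x0, by omega, hx10, fun k hk0 hk10 => ?_⟩
              rcases hall k hk0 hk10 with hlt | hin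
              · exact Or.inl (by omega)
              · exact Or.inr hin
          · rintro (h10 | ⟨x0, hx0, hx10, hall⟩)
            · exact Or.inl (by split_ifs <;> omega)
            · -- the claimed run cannot cross the empty cell a
              by_cases hcase : x0 + 9 < a
              · -- run entirely below a: it fits in the count c, so c ≥ 10
                exact Or.inl (by split_ifs <;> omega)
              · by_cases hcase2 : a + 1 ≤ x0
                · refine Or.inr ⟨x0, by omega, hx10, fun k hk0 hk10 => ?_⟩
                  rcases hall k hk0 hk10 with hlt | hin
                  · exact Or.inl (by omega)
                  · exact Or.inr hin
                · -- x0 ≤ a ≤ x0 + 9 : the run would contain the unoccupied cell a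
                  exfalso
                  rcases hall (a - x0) (by omega) (by omega) with hlt | hin
                  · omega
                  · exact hnmem (by simpa [show x0 + (a - x0) = a by omega] using hin)

theorem pvRowA_iff (positions : List (Int × Int)) (max_x y : Int) :
    (10 ≤ pvRowA positions max_x y) ↔
      ∃ x0 : Int, 1 ≤ x0 ∧ x0 + 10 ≤ max_x ∧
        ∀ k : Int, 0 ≤ k → k < 10 → (x0 + k, y) ∈ positions := by
  by_cases hmx : 1 ≤ max_x
  · unfold pvRowA
    rw [pvRow_inv positions max_x y (max_x - 1).toNat 1 0 0 hmx le_rfl le_rfl le_rfl]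
    constructor
    · rintro (h10 | ⟨x0, hx0, hx10, hall⟩)
      · omega
      · refine ⟨x0, by omega, hx10, fun k hk0 hk10 => ?_⟩
        rcases hall k hk0 hk10 with hlt | hin
        · omega
        · exact hin
    · rintro ⟨x0, hx0, hx10, hall⟩
      exact Or.inr ⟨x0, by omega, hx10, fun k hk0 hk10 => Or.inr (hall k hk0 hk10)⟩
  · unfold pvRowA
    rw [PySem.List.pyRange_one_eq_nil (by omega)]
    simp only [List.foldl_nil]
    constructor
    · intro h; split_ifs at h <;> omega
    · rintro ⟨x0, hx0, hx10, _⟩; omega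

theorem pvLoopA_iff (positions : List (Int × Int)) (max_x : Int) (ys : List Int) :
    pvLoopA positions max_x ys = true ↔ ∃ y ∈ ys, 10 ≤ pvRowA positions max_x y := by
  induction ys with
  | nil => simp [pvLoopA]
  | cons y ys ih =>
      unfold pvLoopA
      by_cases h : 10 ≤ pvRowA positions max_x y
      · simp only [if_pos h]
        exact ⟨fun _ => ⟨y, List.mem_cons_self, h⟩, fun _ => trivial⟩
      · simp only [if_neg h, ih]
        constructor
        · rintro ⟨y', hy', h10⟩; exact ⟨y', List.mem_cons_of_mem _ hy', h10⟩
        · rintro ⟨y', hy', h10⟩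
          rcases List.mem_cons.mp hy' with rfl | hy'
          · exact absurd h10 h
          · exact ⟨y', hy', h10⟩

theorem pvA_iff (positions : List (Int × Int)) (max_x max_y : Int) :
    has_long_horizontal_line positions max_x max_y = true ↔ pvGood positions max_x max_y := by
  unfold has_long_horizontal_line
  rw [pvLoopA_iff]
  constructor
  · rintro ⟨y, hy, h10⟩
    rw [PySem.List.mem_pyRange_one] at hy
    rcases (pvRowA_iff positions max_x y).mp h10 with ⟨x0, hx0, hx10, hall⟩
    exact ⟨x0, y, hy.1, hy.2, hx0, hx10, hall⟩
  · rintro ⟨x, y, hy0, hy1, hx0, hx10, hall⟩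
    refine ⟨y, PySem.List.mem_pyRange_one.mpr ⟨hy0, hy1⟩, ?_⟩
    exact (pvRowA_iff positions max_x y).mpr ⟨x, hx0, hx10, hall⟩

theorem pvMem_occ (positions : List (Int × Int)) (max_x max_y : Int) (p : Int × Int) :
    p ∈ PySem.Set.ofList (positions.filter
        (fun p => 1 ≤ p.1 && p.1 < max_x && 0 ≤ p.2 && p.2 < max_y)) ↔
      (p ∈ positions ∧ 1 ≤ p.1 ∧ p.1 < max_x ∧ 0 ≤ p.2 ∧ p.2 < max_y) := by
  rw [PySem.Set.mem_ofList, List.mem_filter]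
  simp only [Bool.and_eq_true, decide_eq_true_eq]
  tauto

theorem pvB_iff (positions : List (Int × Int)) (max_x max_y : Int) :
    has_long_horizontal_line_alt positions max_x max_y = true ↔ pvGood positions max_x max_y := by
  unfold has_long_horizontal_line_alt
  simp only [List.any_eq_true, List.all_eq_true, PySem.Set.contains_iff]
  constructor
  · rintro ⟨p, hp, hall⟩
    have h9 := (pvMem_occ positions max_x max_y _).mp
      (hall 9 (by rw [PySem.List.mem_pyRange_one]; omega))
    refine ⟨p.1, p.2, ?_, ?_, ?_, by omega, fun k hk0 hk10 => ?_⟩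
    · exact ((pvMem_occ positions max_x max_y p).mp hp).2.2.2.1
    · exact ((pvMem_occ positions max_x max_y p).mp hp).2.2.2.2
    · exact ((pvMem_occ positions max_x max_y p).mp hp).2.1
    · exact ((pvMem_occ positions max_x max_y _).mp
        (hall k (by rw [PySem.List.mem_pyRange_one]; omega))).1
  · rintro ⟨x, y, hy0, hy1, hx0, hx10, hall⟩
    refine ⟨(x, y), ?_, fun k hk => ?_⟩
    · exact (pvMem_occ positions max_x max_y (x, y)).mpr
        ⟨by simpa using hall 0 le_rfl (by omega), by omega, by omega, hy0, hy1⟩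
    · rw [PySem.List.mem_pyRange_one] at hk
      exact (pvMem_occ positions max_x max_y _).mpr
        ⟨hall k hk.1 hk.2, by omega, by omega, hy0, hy1⟩

-- ===== VERDICT (by name: the statement is the Claim_ definition above) =====
theorem has_long_horizontal_line_spec : Claim_equal_has_long_horizontal_line := by
  intro positions max_x max_y _
  unfold Spec_has_long_horizontal_line
  rw [Bool.eq_iff_iff, pvA_iff, pvB_iff]
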